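-- pv_equiv track=rewrite | github.com/xaerru/Tasks | 2021-01-04/sol.py | check
-- ===== SOURCE A (Python) =====
-- def check(a:list) -> str:
--     inc = 0
--     dec = 0
--     for x in range(len(a)-1):
--         if a[x]<a[x+1]:
--             inc+=1
--         else:
--             dec+=1
--     if inc==0:
--         return "decreasing"
--     elif dec==0:
--         return "increasing"
--     else:
--         return "neither"
-- ===== SOURCE B (Python) =====
-- def check(a: list) -> str:
--     pairs = list(zip(a, a[1:]))
--     if all(x >= y for x, y in pairs):
--         return "decreasing"
--     if all(x < y for x, y in pairs):
--         return "increasing"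
--     return "neither"
-- ===== Notes on version B (the rewrite author's own statement) =====
-- stated objective: simpler
-- what changed: Replaces the inc/dec counter accumulation over indices with two short-circuiting all() tests over the adjacent pairs (zip of the list with its tail), keeping no state at all.
import Mathlib
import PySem

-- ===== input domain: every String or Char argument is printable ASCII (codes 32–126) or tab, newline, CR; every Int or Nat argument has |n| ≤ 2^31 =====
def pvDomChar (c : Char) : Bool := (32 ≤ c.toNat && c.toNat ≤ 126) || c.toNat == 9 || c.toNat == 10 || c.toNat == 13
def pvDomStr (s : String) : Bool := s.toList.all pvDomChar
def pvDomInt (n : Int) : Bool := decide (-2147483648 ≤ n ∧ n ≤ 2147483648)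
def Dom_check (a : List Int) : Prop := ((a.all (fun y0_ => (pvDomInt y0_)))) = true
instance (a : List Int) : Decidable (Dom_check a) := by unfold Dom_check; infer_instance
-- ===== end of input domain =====

-- B replaces A's inc/dec counters over index range with two stateless `all` tests over adjacent pairs (simpler decomposition, same O(n)).


-- ===== PORT A =====
-- a[x] / a[x+1] are always in range for x in range(len(a)-1), so pyGetD's default is never used (exact).
def check (a : List Int) : String :=
  let s := (PySem.List.pyRange 0 ((a.length : Int) - 1) 1).foldl
    (fun (p : Int × Int) x =>
      if PySem.List.pyGetD a x 0 < PySem.List.pyGetD a (x + 1) 0 then (p.1 + 1, p.2)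
      else (p.1, p.2 + 1))
    (0, 0)
  if s.1 = 0 then "decreasing"
  else if s.2 = 0 then "increasing"
  else "neither"

-- ===== PORT B =====
def check_alt (a : List Int) : String :=
  let pairs := a.zip a.tail
  if pairs.all (fun p => p.2 ≤ p.1) then "decreasing"
  else if pairs.all (fun p => p.1 < p.2) then "increasing"
  else "neither"

-- ===== PRECONDITION & SPEC =====
def Spec_check (a : List Int) (out : String) : Prop := out = check_alt a
instance (a : List Int) (out : String) : Decidable (Spec_check a out) := by unfold Spec_check; infer_instance

-- ===== CLAIM (what is proved, stated in full; the proofs are below) =====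
def Claim_equal_check : Prop := ∀ (a : List Int), Dom_check a → Spec_check a (check a)

-- ===== LEMMAS AND PROOFS =====

-- A's index range mapped to the values it compares is exactly the adjacent-pair list.
theorem pv_range_map_pairs (a : List Int) :
    (PySem.List.pyRange 0 ((a.length : Int) - 1) 1).map
      (fun x => (PySem.List.pyGetD a x 0, PySem.List.pyGetD a (x + 1) 0)) = a.zip a.tail := by
  apply List.ext_getElem
  · simp [PySem.List.length_pyRange_one, List.length_zip, List.length_tail]
  · intro k h1 h2
    have hk : k < a.length - 1 := by
      simpa [PySem.List.length_pyRange_one] using h1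
    have hk' : k < (PySem.List.pyRange 0 ((a.length : Int) - 1) 1).length := by
      simpa [PySem.List.length_pyRange_one] using hk
    have hx : (PySem.List.pyRange 0 ((a.length : Int) - 1) 1)[k]'hk' = (k : Int) := by
      simp [PySem.List.getElem_pyRange_one]
    have g1 : PySem.List.pyGetD a (k : Int) 0 = a[k] := by
      rw [PySem.List.pyGetD_natCast]
      exact List.getD_eq_getElem _ _ (by omega)
    have g2 : PySem.List.pyGetD a ((k : Int) + 1) 0 = a[k + 1] := by
      have : ((k : Int) + 1) = ((k + 1 : Nat) : Int) := by push_cast; ring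
      rw [this, PySem.List.pyGetD_natCast]
      exact List.getD_eq_getElem _ _ (by omega)
    simp only [List.getElem_map, hx, g1, g2, List.getElem_zip]
    congr 1
    exact (List.getElem_tail _).symm.trans (by congr 1)

-- The counter fold computes countP of each branch test.
theorem pv_fold_counts (L : List (Int × Int)) (i d : Int) :
    L.foldl (fun (p : Int × Int) (q : Int × Int) =>
        if q.1 < q.2 then (p.1 + 1, p.2) else (p.1, p.2 + 1)) (i, d)
      = (i + L.countP (fun q => decide (q.1 < q.2)),
         d + L.countP (fun q => decide (q.2 ≤ q.1))) := by
  induction L generalizing i d with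
  | nil => simp
  | cons q t ih =>
    by_cases h : q.1 < q.2
    · simp [h, ih, not_le.mpr h]
      omega
    · simp [h, ih, not_lt.mp h]
      omega

-- ===== VERDICT (by name: the statement is the Claim_ definition above) =====
theorem check_spec : Claim_equal_check := by
  intro a _
  show check a = check_alt a
  have hfold := List.foldl_map
      (f := fun x => (PySem.List.pyGetD a x 0, PySem.List.pyGetD a (x + 1) 0))
      (g := fun (p : Int × Int) (q : Int × Int) =>
        if q.1 < q.2 then (p.1 + 1, p.2) else (p.1, p.2 + 1))
      (l := PySem.List.pyRange 0 ((a.length : Int) - 1) 1)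
      (init := ((0 : Int), (0 : Int)))
  rw [pv_range_map_pairs, pv_fold_counts] at hfold
  simp only [check, check_alt, ← hfold]
  set L := a.zip a.tail with hL
  simp only [zero_add]
  have hc1 : ((L.countP (fun q => decide (q.1 < q.2)) : Int) = 0)
      ↔ L.all (fun p => decide (p.2 ≤ p.1)) = true := by
    rw [Int.natCast_eq_zero, List.countP_eq_zero]
    simp [List.all_eq_true, not_lt]
  have hc2 : ((L.countP (fun q => decide (q.2 ≤ q.1)) : Int) = 0)
      ↔ L.all (fun p => decide (p.1 < p.2)) = true := by
    rw [Int.natCast_eq_zero, List.countP_eq_zero]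
    simp [List.all_eq_true, not_le]
  by_cases h1 : L.all (fun p => decide (p.2 ≤ p.1)) = true
  · rw [if_pos (hc1.mpr h1), if_pos h1]
  · rw [if_neg (fun h => h1 (hc1.mp h)), if_neg h1]
    by_cases h2 : L.all (fun p => decide (p.1 < p.2)) = true
    · rw [if_pos (hc2.mpr h2), if_pos h2]
    · rw [if_neg (fun h => h2 (hc2.mp h)), if_neg h2]
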